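-- pv_equiv track=rewrite | github.com/matren6/aaia | packages/modules/mandates.py | _simple_mandate_check
-- ===== SOURCE A (Python) =====
-- from typing import List, Tuple, Dict, Any, Optional
--
-- def _simple_mandate_check(action: str) -> List[Dict[str, Any]]:
--     """Simple rule-based mandate checking as fallback"""
--     violations = []
--     action_lower = action.lower()
--
--     # Check for harm-related terms
--     if any(term in action_lower for term in ['harm', 'damage', 'destroy']):
--         if 'backup' not in action_lower:
--             violations.append({
--                 'mandate': 'Non-Maleficence',
--                 'description': 'Action may cause harm without backup',
--                 'violation_description': 'Action may cause harm without backup',  # Backward compat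
--                 'severity': 'major',
--                 'reasoning': 'Destructive action without recovery mechanism',
--                 'action': action[:200]
--             })
--
--     # Check for deception
--     if any(term in action_lower for term in ['lie', 'deceive', 'false', 'fake']):
--         violations.append({
--             'mandate': 'Veracity & Transparent Reasoning',
--             'description': 'Action involves deception',
--             'violation_description': 'Action involves deception',  # Backward compat
--             'severity': 'major',
--             'reasoning': 'Violates transparency mandate',
--             'action': action[:200]
--         })
--
--     # Check for deletion without verification
--     if 'delete' in action_lower and 'verify' not in action_lower:
--         violations.append({
--             'mandate': 'Non-Maleficence',
--             'description': 'Deletion without verification',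
--             'violation_description': 'Deletion without verification',  # Backward compat
--             'severity': 'major',
--             'reasoning': 'Potentially irreversible action',
--             'action': action[:200]
--         })
--
--     return violations
-- ===== SOURCE B (Python) =====
-- _KEYWORDS = ('harm', 'damage', 'destroy', 'lie', 'deceive', 'false', 'fake',
--              'delete', 'backup', 'verify')
--
-- _RULES = [
--     (('harm', 'damage', 'destroy'), 'backup', 'Non-Maleficence',
--      'Action may cause harm without backup',
--      'Destructive action without recovery mechanism'),
--     (('lie', 'deceive', 'false', 'fake'), None, 'Veracity & Transparent Reasoning',
--      'Action involves deception',
--      'Violates transparency mandate'),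
--     (('delete',), 'verify', 'Non-Maleficence',
--      'Deletion without verification',
--      'Potentially irreversible action'),
-- ]
--
--
-- def _simple_mandate_check(action):
--     """Single left-to-right multi-pattern scan of the lowered text collecting the
--     set of keywords that occur, then one pass over a declarative rules table
--     consulting that set."""
--     lo = action.lower()
--     found = set()
--     for i in range(len(lo) + 1):
--         for kw in _KEYWORDS:
--             if lo.startswith(kw, i):
--                 found.add(kw)
--     return [
--         {
--             'mandate': mandate,
--             'description': desc,
--             'violation_description': desc,
--             'severity': 'major',
--             'reasoning': reasoning,
--             'action': action[:200],
--         }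
--         for triggers, excl, mandate, desc, reasoning in _RULES
--         if any(t in found for t in triggers) and (excl is None or excl not in found)
--     ]
-- ===== Notes on version B (the rewrite author's own statement) =====
-- stated objective: alternative
-- what changed: Instead of running a separate substring search per trigger term, B makes one left-to-right positional scan of the lowered text that collects the set of all occurring keywords at once, then fills violations by consulting that set through a declarative rules table.
import Mathlib
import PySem

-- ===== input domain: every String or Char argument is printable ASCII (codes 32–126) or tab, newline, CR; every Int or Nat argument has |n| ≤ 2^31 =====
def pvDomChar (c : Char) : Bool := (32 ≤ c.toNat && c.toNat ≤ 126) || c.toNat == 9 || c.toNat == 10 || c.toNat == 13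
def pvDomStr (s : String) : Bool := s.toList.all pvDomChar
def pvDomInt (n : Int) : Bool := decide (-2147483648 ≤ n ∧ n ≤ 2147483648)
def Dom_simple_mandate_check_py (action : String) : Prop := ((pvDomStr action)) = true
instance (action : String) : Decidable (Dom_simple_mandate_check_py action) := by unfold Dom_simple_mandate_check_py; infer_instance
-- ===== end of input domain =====

-- B replaces A's per-rule substring searches by ONE positional scan of the lowered text
-- collecting the set of occurring keywords, consulted through a rules table (objective: alternative).

-- ===== PORT A =====
def simple_mandate_check_py (action : String) : List (List (String × String)) :=
  let violations : List (List (String × String)) := []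
  let action_lower := PySem.Str.lower action
  -- Check for harm-related terms
  let violations :=
    if ["harm", "damage", "destroy"].any (fun term => PySem.Str.isIn term action_lower) then
      if ¬ (PySem.Str.isIn "backup" action_lower) then
        violations ++ [[("mandate", "Non-Maleficence"),
                        ("description", "Action may cause harm without backup"),
                        ("violation_description", "Action may cause harm without backup"),
                        ("severity", "major"),
                        ("reasoning", "Destructive action without recovery mechanism"),
                        ("action", PySem.Str.slice action none (some 200))]]
      else violations
    else violations
  -- Check for deception
  let violations :=
    if ["lie", "deceive", "false", "fake"].any (fun term => PySem.Str.isIn term action_lower) then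
      violations ++ [[("mandate", "Veracity & Transparent Reasoning"),
                      ("description", "Action involves deception"),
                      ("violation_description", "Action involves deception"),
                      ("severity", "major"),
                      ("reasoning", "Violates transparency mandate"),
                      ("action", PySem.Str.slice action none (some 200))]]
    else violations
  -- Check for deletion without verification
  let violations :=
    if PySem.Str.isIn "delete" action_lower ∧ ¬ (PySem.Str.isIn "verify" action_lower) then
      violations ++ [[("mandate", "Non-Maleficence"),
                      ("description", "Deletion without verification"),
                      ("violation_description", "Deletion without verification"),
                      ("severity", "major"),
                      ("reasoning", "Potentially irreversible action"),
                      ("action", PySem.Str.slice action none (some 200))]]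
    else violations
  violations

-- ===== PORT B =====
def pvKeywords : List String :=
  ["harm", "damage", "destroy", "lie", "deceive", "false", "fake", "delete", "backup", "verify"]

-- B-side rules table: (triggers, optional exclusion, mandate, description, reasoning)
def pvRules : List (List String × Option String × String × String × String) :=
  [(["harm", "damage", "destroy"], some "backup", "Non-Maleficence",
    "Action may cause harm without backup",
    "Destructive action without recovery mechanism"),
   (["lie", "deceive", "false", "fake"], none, "Veracity & Transparent Reasoning",
    "Action involves deception",
    "Violates transparency mandate"),
   ([("delete" : String)], some "verify", "Non-Maleficence",
    "Deletion without verification",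
    "Potentially irreversible action")]

-- the scan loop of Source B: 'for i in range(len(lo)+1): for kw in _KEYWORDS: if lo.startswith(kw, i): found.add(kw)'
-- range(len+1) is 0..len, all nonnegative, so the Nat fold is exact; 'lo.startswith(kw, i)' with
-- 0 ≤ i ≤ len(lo) is exactly the prefix test on lo.drop i (PySem.Chars.startswith).
def pvFound (lo : List Char) : PySem.Set String :=
  (List.range (lo.length + 1)).foldl
    (fun f i =>
      pvKeywords.foldl
        (fun f kw => if PySem.Chars.startswith (lo.drop i) kw.toList then PySem.Set.add f kw else f)
        f)
    PySem.Set.empty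

def simple_mandate_check_py_alt (action : String) : List (List (String × String)) :=
  let lo := (PySem.Str.lower action).toList
  let found := pvFound lo
  (pvRules.filter (fun r =>
      r.1.any (fun t => PySem.Set.contains found t) &&
      (match r.2.1 with
       | none => true
       | some e => ¬ PySem.Set.contains found e))).map
    (fun r =>
      [("mandate", r.2.2.1),
       ("description", r.2.2.2.1),
       ("violation_description", r.2.2.2.1),
       ("severity", "major"),
       ("reasoning", r.2.2.2.2),
       ("action", PySem.Str.slice action none (some 200))])

-- ===== PRECONDITION & SPEC =====
def Spec_simple_mandate_check_py (action : String) (out : List (List (String × String))) : Prop := out = simple_mandate_check_py_alt action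
instance (action : String) (out : List (List (String × String))) : Decidable (Spec_simple_mandate_check_py action out) := by unfold Spec_simple_mandate_check_py; infer_instance

-- ===== CLAIM =====
def Claim_equal_simple_mandate_check_py : Prop := ∀ (action : String), Dom_simple_mandate_check_py action → Spec_simple_mandate_check_py action (simple_mandate_check_py action)

-- ===== LEMMAS AND PROOFS =====

theorem pv_mem_foldl_add_if (ks : List String) (P : String → Bool) (f : PySem.Set String) (w : String) :
    w ∈ ks.foldl (fun f k => if P k then PySem.Set.add f k else f) f ↔
      w ∈ f ∨ (w ∈ ks ∧ P w = true) := by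
  induction ks generalizing f with
  | nil => simp
  | cons k ks ih =>
    rw [List.foldl_cons, ih]
    by_cases h : P k = true
    · rw [if_pos h, PySem.Set.mem_add]
      simp only [List.mem_cons]
      constructor
      · rintro ((hf | rfl) | hk)
        · exact Or.inl hf
        · exact Or.inr ⟨Or.inl rfl, h⟩
        · exact Or.inr ⟨Or.inr hk.1, hk.2⟩
      · rintro (hf | ⟨(rfl | hk), hp⟩)
        · exact Or.inl (Or.inl hf)
        · exact Or.inl (Or.inr rfl)
        · exact Or.inr ⟨hk, hp⟩
    · rw [if_neg h]
      simp only [List.mem_cons]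
      constructor
      · rintro (hf | hk)
        · exact Or.inl hf
        · exact Or.inr ⟨Or.inr hk.1, hk.2⟩
      · rintro (hf | ⟨(rfl | hk), hp⟩)
        · exact Or.inl hf
        · exact absurd hp h
        · exact Or.inr ⟨hk, hp⟩

theorem pv_mem_scan (lo : List Char) (n : Nat) (w : String) :
    w ∈ (List.range n).foldl
        (fun f i =>
          pvKeywords.foldl
            (fun f kw => if PySem.Chars.startswith (lo.drop i) kw.toList then PySem.Set.add f kw else f)
            f)
        PySem.Set.empty ↔
      (w ∈ pvKeywords ∧ ∃ i < n, PySem.Chars.startswith (lo.drop i) w.toList = true) := by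
  induction n with
  | zero => simp [PySem.Set.empty]
  | succ n ih =>
    rw [List.range_succ, List.foldl_append]
    simp only [List.foldl_cons, List.foldl_nil, pv_mem_foldl_add_if, ih]
    constructor
    · rintro (⟨hw, i, hi, hp⟩ | ⟨hw, hp⟩)
      · exact ⟨hw, i, Nat.lt_succ_of_lt hi, hp⟩
      · exact ⟨hw, n, Nat.lt_succ_self n, hp⟩
    · rintro ⟨hw, i, hi, hp⟩
      rcases Nat.lt_succ_iff_lt_or_eq.mp hi with h | rfl
      · exact Or.inl ⟨hw, i, h, hp⟩
      · exact Or.inr ⟨hw, hp⟩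

theorem pv_found_mem_iff (s : List Char) (w : String) (hw : w ∈ pvKeywords) :
    w ∈ pvFound s ↔ PySem.Chars.isIn w.toList s = true := by
  rw [pvFound, pv_mem_scan]
  constructor
  · rintro ⟨-, i, -, hp⟩
    exact (PySem.Chars.isIn_iff_infix w.toList s).mpr
      (((PySem.Chars.startswith_iff _ _).mp hp).isInfix.trans (List.drop_suffix i s).isInfix)
  · intro h
    rcases (PySem.Chars.isIn_iff_infix w.toList s).mp h with ⟨pre, suf, hps⟩
    have hj : w.toList <+: s.drop pre.length := by
      rw [← hps, List.append_assoc, List.drop_left]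
      exact List.prefix_append _ _
    refine ⟨hw, min pre.length s.length, by omega, (PySem.Chars.startswith_iff _ _).mpr ?_⟩
    by_cases hle : pre.length ≤ s.length
    · simpa [min_eq_left hle] using hj
    · have h1 : s.drop pre.length = [] := List.drop_eq_nil_of_le (by omega)
      have h2 : s.drop (min pre.length s.length) = [] := List.drop_eq_nil_of_le (by omega)
      rw [h2]; rw [h1] at hj; exact hj

theorem pv_found_contains (s : List Char) (w : String) (hw : w ∈ pvKeywords) :
    decide (w ∈ pvFound s) = PySem.Chars.isIn w.toList s := by
  have hiff := pv_found_mem_iff s w hw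
  cases h : PySem.Chars.isIn w.toList s
  · simp [hiff, h]
  · simp [hiff, h]

-- ===== VERDICT =====
set_option maxHeartbeats 3200000 in
theorem simple_mandate_check_py_spec : Claim_equal_simple_mandate_check_py := by
  intro action _
  unfold Spec_simple_mandate_check_py simple_mandate_check_py simple_mandate_check_py_alt pvRules
  have e1 := pv_found_contains (PySem.Chars.lower action.toList) "harm" (by decide)
  have e2 := pv_found_contains (PySem.Chars.lower action.toList) "damage" (by decide)
  have e3 := pv_found_contains (PySem.Chars.lower action.toList) "destroy" (by decide)
  have e4 := pv_found_contains (PySem.Chars.lower action.toList) "lie" (by decide)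
  have e5 := pv_found_contains (PySem.Chars.lower action.toList) "deceive" (by decide)
  have e6 := pv_found_contains (PySem.Chars.lower action.toList) "false" (by decide)
  have e7 := pv_found_contains (PySem.Chars.lower action.toList) "fake" (by decide)
  have e8 := pv_found_contains (PySem.Chars.lower action.toList) "delete" (by decide)
  have e9 := pv_found_contains (PySem.Chars.lower action.toList) "backup" (by decide)
  have e10 := pv_found_contains (PySem.Chars.lower action.toList) "verify" (by decide)
  set lo := PySem.Str.lower action with hlo
  cases h1 : ["harm", "damage", "destroy"].any (fun t => PySem.Str.isIn t lo) <;>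
  cases h2 : PySem.Str.isIn "backup" lo <;>
  cases h3 : ["lie", "deceive", "false", "fake"].any (fun t => PySem.Str.isIn t lo) <;>
  cases h4 : PySem.Str.isIn "delete" lo <;>
  cases h5 : PySem.Str.isIn "verify" lo <;>
  simp only [List.any_cons, List.any_nil, Bool.or_eq_true, Bool.or_eq_false_iff] at h1 h3 <;>
  (try rcases h1 with h1 | h1 | h1) <;>
  (try rcases h3 with h3 | h3 | h3 | h3) <;>
  simp_all [List.filter]
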